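-- pv_equiv track=rewrite | github.com/SapalChap/AiWebTerminal | app.py | validate_registration_data
-- ===== SOURCE A (Python) =====
-- def validate_registration_data(username, email, password, confirm_password):
--     """Validate registration form data and return error message if invalid"""
--     # Basic validation
--     if not username or not email or not password:
--         return 'All fields are required.'
--
--     if password != confirm_password:
--         return 'Passwords do not match.'
--
--     # Enhanced password validation
--     if len(password) < 8:
--         return 'Password must be at least 8 characters long.'
--
--     if not any(c.isupper() for c in password):
--         return 'Password must contain at least one uppercase letter.'
--
--     if not any(c.islower() for c in password):
--         return 'Password must contain at least one lowercase letter.'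
--
--     if not any(c.isdigit() for c in password):
--         return 'Password must contain at least one number.'
--
--     special_chars = "!@#$%^&*()_+-=[]{}|;:,.<>?"
--     if not any(c in special_chars for c in password):
--         return 'Password must contain at least one special character (!@#$%^&*()_+-=[]{}|;:,.<>?).'
--
--     return None  # No validation errors
-- ===== SOURCE B (Python) =====
-- def validate_registration_data(username, email, password, confirm_password):
--     """Validate registration form data and return error message if invalid"""
--     if not username or not email or not password:
--         return 'All fields are required.'
--     if password != confirm_password:
--         return 'Passwords do not match.'
--     # single pass over the password computing all character-class flags
--     has_upper = has_lower = has_digit = has_special = False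
--     special_chars = "!@#$%^&*()_+-=[]{}|;:,.<>?"
--     for c in password:
--         if c.isupper():
--             has_upper = True
--         elif c.islower():
--             has_lower = True
--         elif c.isdigit():
--             has_digit = True
--         if c in special_chars:
--             has_special = True
--     if len(password) < 8:
--         return 'Password must be at least 8 characters long.'
--     if not has_upper:
--         return 'Password must contain at least one uppercase letter.'
--     if not has_lower:
--         return 'Password must contain at least one lowercase letter.'
--     if not has_digit:
--         return 'Password must contain at least one number.'
--     if not has_special:
--         return 'Password must contain at least one special character (!@#$%^&*()_+-=[]{}|;:,.<>?).'
--     return None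
-- ===== Notes on version B (the rewrite author's own statement) =====
-- stated objective: alternative
-- what changed: B replaces the four separate any() scans of the password with one combined pass that accumulates has_upper/has_lower/has_digit/has_special flags, then runs the guards on the precomputed flags in the original order with identical messages.
import Mathlib
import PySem

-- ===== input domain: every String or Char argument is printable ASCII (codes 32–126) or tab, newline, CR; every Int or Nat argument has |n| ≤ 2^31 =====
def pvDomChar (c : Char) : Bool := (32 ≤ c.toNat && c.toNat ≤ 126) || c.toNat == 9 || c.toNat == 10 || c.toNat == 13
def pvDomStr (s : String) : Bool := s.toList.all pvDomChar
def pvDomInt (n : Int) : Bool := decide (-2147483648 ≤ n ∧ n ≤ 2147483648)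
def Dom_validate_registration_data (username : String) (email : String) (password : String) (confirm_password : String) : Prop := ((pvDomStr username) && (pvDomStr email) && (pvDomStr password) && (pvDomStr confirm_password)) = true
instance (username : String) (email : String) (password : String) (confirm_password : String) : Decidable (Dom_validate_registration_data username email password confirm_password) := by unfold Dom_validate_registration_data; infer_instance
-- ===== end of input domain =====

-- B merges A's four separate any() scans of the password into one flag-accumulating pass; same guards, order and messages (objective: alternative decomposition).

-- ===== PORT A =====
def validate_registration_data (username : String) (email : String) (password : String) (confirm_password : String) : Option String :=
  if username = "" || email = "" || password = "" then
    some "All fields are required."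
  else if password ≠ confirm_password then
    some "Passwords do not match."
  else if PySem.Str.len password < 8 then
    some "Password must be at least 8 characters long."
  else if !(password.toList.any (fun c => PySem.Chars.isupper c)) then
    some "Password must contain at least one uppercase letter."
  else if !(password.toList.any (fun c => PySem.Chars.islower c)) then
    some "Password must contain at least one lowercase letter."
  else if !(password.toList.any (fun c => PySem.Chars.isdigit c)) then
    some "Password must contain at least one number."
  else if !(password.toList.any (fun c => "!@#$%^&*()_+-=[]{}|;:,.<>?".toList.contains c)) then
    some "Password must contain at least one special character (!@#$%^&*()_+-=[]{}|;:,.<>?)."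
  else
    none

-- ===== PORT B =====
-- one step of B's combined loop: update the four flags for one character
def pvFlagStep (st : Bool × Bool × Bool × Bool) (c : Char) : Bool × Bool × Bool × Bool :=
  let st1 :=
    if PySem.Chars.isupper c then (true, st.2.1, st.2.2.1, st.2.2.2)
    else if PySem.Chars.islower c then (st.1, true, st.2.2.1, st.2.2.2)
    else if PySem.Chars.isdigit c then (st.1, st.2.1, true, st.2.2.2)
    else st
  if "!@#$%^&*()_+-=[]{}|;:,.<>?".toList.contains c then (st1.1, st1.2.1, st1.2.2.1, true)
  else st1

def validate_registration_data_alt (username : String) (email : String) (password : String) (confirm_password : String) : Option String :=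
  if username = "" || email = "" || password = "" then
    some "All fields are required."
  else if password ≠ confirm_password then
    some "Passwords do not match."
  else
    let flags := password.toList.foldl pvFlagStep (false, false, false, false)
    if PySem.Str.len password < 8 then
      some "Password must be at least 8 characters long."
    else if !flags.1 then
      some "Password must contain at least one uppercase letter."
    else if !flags.2.1 then
      some "Password must contain at least one lowercase letter."
    else if !flags.2.2.1 then
      some "Password must contain at least one number."
    else if !flags.2.2.2 then
      some "Password must contain at least one special character (!@#$%^&*()_+-=[]{}|;:,.<>?)."
    else
      none

-- ===== PRECONDITION & SPEC =====
def Spec_validate_registration_data (username : String) (email : String) (password : String) (confirm_password : String) (out : Option String) : Prop := out = validate_registration_data_alt username email password confirm_password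
instance (username : String) (email : String) (password : String) (confirm_password : String) (out : Option String) : Decidable (Spec_validate_registration_data username email password confirm_password out) := by unfold Spec_validate_registration_data; infer_instance

-- ===== CLAIM (what is proved, stated in full; the proofs are below) =====
def Claim_equal_validate_registration_data : Prop := ∀ (username : String) (email : String) (password : String) (confirm_password : String), Dom_validate_registration_data username email password confirm_password → Spec_validate_registration_data username email password confirm_password (validate_registration_data username email password confirm_password)

-- ===== LEMMAS AND PROOFS =====
-- each step of B's loop ORs in this character's class bits
theorem pvFlagStep_eq (st : Bool × Bool × Bool × Bool) (c : Char) :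
    pvFlagStep st c =
      (st.1 || PySem.Chars.isupper c, st.2.1 || PySem.Chars.islower c,
       st.2.2.1 || PySem.Chars.isdigit c,
       st.2.2.2 || "!@#$%^&*()_+-=[]{}|;:,.<>?".toList.contains c) := by
  obtain ⟨b1, b2, b3, b4⟩ := st
  have hul : PySem.Chars.isupper c = true → PySem.Chars.islower c = false := by
    simp [PySem.Chars.isupper, PySem.Chars.islower, Char.le_def, UInt32.le_iff_toNat_le]; omega
  have hud : PySem.Chars.isupper c = true → PySem.Chars.isdigit c = false := by
    simp [PySem.Chars.isupper, PySem.Chars.isdigit, Char.le_def, UInt32.le_iff_toNat_le]; omega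
  have hld : PySem.Chars.islower c = true → PySem.Chars.isdigit c = false := by
    simp [PySem.Chars.islower, PySem.Chars.isdigit, Char.le_def, UInt32.le_iff_toNat_le]; omega
  unfold pvFlagStep
  generalize "!@#$%^&*()_+-=[]{}|;:,.<>?".toList.contains c = sp
  rcases hu : PySem.Chars.isupper c <;> rcases hl : PySem.Chars.islower c <;>
    rcases hd : PySem.Chars.isdigit c <;> rcases sp <;> simp_all

-- B's combined loop computes exactly the four any-scans A performs
theorem pvFlags_eq (l : List Char) (b1 b2 b3 b4 : Bool) :
    l.foldl pvFlagStep (b1, b2, b3, b4) =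
      (b1 || l.any (fun c => PySem.Chars.isupper c),
       b2 || l.any (fun c => PySem.Chars.islower c),
       b3 || l.any (fun c => PySem.Chars.isdigit c),
       b4 || l.any (fun c => "!@#$%^&*()_+-=[]{}|;:,.<>?".toList.contains c)) := by
  induction l generalizing b1 b2 b3 b4 with
  | nil => simp
  | cons c t ih =>
    simp only [List.foldl_cons, List.any_cons, pvFlagStep_eq, ih, Bool.or_assoc]

-- ===== VERDICT (by name: the statement is the Claim_ definition above) =====
theorem validate_registration_data_spec : Claim_equal_validate_registration_data := by
  intro u e p c _
  unfold Spec_validate_registration_data validate_registration_data validate_registration_data_alt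
  simp only [pvFlags_eq, Bool.false_or]
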